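-- pv_equiv track=rewrite | github.com/Linzwcs/semafs | semafs/core/rules.py | _alpha_suffix
-- ===== SOURCE A (Python) =====
-- def _alpha_suffix(index: int) -> str:
--     """Convert 1-based index to alphabetic suffix: 1->a, 27->aa."""
--     chars: list[str] = []
--     current = index
--     while current > 0:
--         current -= 1
--         chars.append(chr(ord("a") + (current % 26)))
--         current //= 26
--     return "".join(reversed(chars))
-- ===== SOURCE B (Python) =====
-- def _alpha_suffix(index: int) -> str:
--     """Convert 1-based index to alphabetic suffix: 1->a, 27->aa."""
--     if index <= 0:
--         return ""
--     index -= 1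
--     return _alpha_suffix(index // 26) + chr(ord("a") + index % 26)
-- ===== Notes on version B (the rewrite author's own statement) =====
-- stated objective: simpler
-- what changed: Replaces the list-accumulating while loop plus reversed()/join with a direct recursion over the quotient that emits digits most-significant-first, so no list and no reversal are needed.
import Mathlib
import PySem

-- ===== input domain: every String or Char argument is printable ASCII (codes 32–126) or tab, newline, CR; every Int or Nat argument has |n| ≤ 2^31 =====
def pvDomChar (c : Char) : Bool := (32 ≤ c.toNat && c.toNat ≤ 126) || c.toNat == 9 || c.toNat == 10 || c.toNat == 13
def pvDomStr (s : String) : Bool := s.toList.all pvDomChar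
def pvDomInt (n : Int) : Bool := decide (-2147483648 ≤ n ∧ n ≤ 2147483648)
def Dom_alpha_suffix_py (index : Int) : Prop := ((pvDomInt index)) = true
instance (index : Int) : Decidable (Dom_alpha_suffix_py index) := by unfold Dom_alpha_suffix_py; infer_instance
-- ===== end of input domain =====

-- B replaces A's list-accumulating loop + reversed()/join by a recursion on the quotient
-- emitting digits most-significant-first (objective: simpler — no list, no reversal).

-- termination helper used by both ports' recursions
theorem pv_quot_lt (c : Int) (h : 0 < c) :
    (PySem.Int.floordiv (c - 1) 26).toNat < c.toNat := by
  rw [PySem.Int.floordiv_eq_ediv_of_pos (by norm_num)]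
  have h1 : (c - 1) / 26 ≤ c - 1 := Int.ediv_le_self _ (by omega)
  have h2 : 0 ≤ (c - 1) / 26 := Int.ediv_nonneg (by omega) (by norm_num)
  omega

-- ===== PORT A =====
-- the while loop: state = (current, chars); chars.append then current //= 26
def pvALoop (current : Int) (chars : List Char) : List Char :=
  if h : current > 0 then
    pvALoop (PySem.Int.floordiv (current - 1) 26)
      (chars ++ [Char.ofNat (97 + (PySem.Int.mod (current - 1) 26)).toNat])
  else chars
termination_by current.toNat
decreasing_by exact pv_quot_lt current h

def alpha_suffix_py (index : Int) : String :=
  String.ofList ((pvALoop index []).reverse)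

-- ===== PORT B =====
def alpha_suffix_py_alt (index : Int) : String :=
  if h : index ≤ 0 then ""
  else
    alpha_suffix_py_alt (PySem.Int.floordiv (index - 1) 26) ++
      String.ofList [Char.ofNat (97 + (PySem.Int.mod (index - 1) 26)).toNat]
termination_by index.toNat
decreasing_by exact pv_quot_lt index (by omega)

-- ===== PRECONDITION & SPEC =====
def Spec_alpha_suffix_py (index : Int) (out : String) : Prop := out = alpha_suffix_py_alt index
instance (index : Int) (out : String) : Decidable (Spec_alpha_suffix_py index out) := by unfold Spec_alpha_suffix_py; infer_instance

-- ===== CLAIM (what is proved, stated in full; the proofs are below) =====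
def Claim_equal_alpha_suffix_py : Prop := ∀ (index : Int), Dom_alpha_suffix_py index → Spec_alpha_suffix_py index (alpha_suffix_py index)

-- ===== LEMMAS AND PROOFS =====
theorem pvALoop_eq_alt (current : Int) (chars : List Char) :
    pvALoop current chars = chars ++ (alpha_suffix_py_alt current).toList.reverse := by
  induction current, chars using pvALoop.induct with
  | case1 current chars h ih =>
      rw [pvALoop, alpha_suffix_py_alt]
      simp only [h, dif_pos, dif_neg (by omega : ¬ current ≤ 0)]
      rw [ih]
      simp [String.toList_append]
  | case2 current chars h =>
      rw [pvALoop, alpha_suffix_py_alt]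
      simp only [h, dif_pos (by omega : current ≤ 0)]
      simp

-- ===== VERDICT (by name: the statement is the Claim_ definition above) =====
theorem alpha_suffix_py_spec : Claim_equal_alpha_suffix_py := by
  intro index _
  unfold Spec_alpha_suffix_py alpha_suffix_py
  rw [pvALoop_eq_alt]
  simp
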